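-- pv_equiv track=rewrite | github.com/ravirajawasthi/python_pdsa_nptel | week4/assignment.py | transcript
-- ===== SOURCE A (Python) =====
-- def transcript(coursedetails, studentdetails, grades):
--     course_dict = {}
--     student_dict = {}
--     for i in coursedetails:
--         course_dict[i[0]] = i[1]
--     for i in studentdetails:
--         student_dict[i[0]] = i[1]
--     roll_no = []
--     for roll_nos in student_dict.keys():
--         roll_no.append(roll_nos)
--     roll_no.sort()
--     grades.sort()
--     final_list = []
--     for i in roll_no:
--         individual_tuple = ()
--         individual_tuple += (i, student_dict[i])
--         grade_list = []
--         for j in grades: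
--             if j[0] == i:
--                 grade_list.append((j[1], course_dict[j[1]], j[2]))
--         individual_tuple += (grade_list,)
--         final_list.append(individual_tuple)
--     return final_list
-- ===== SOURCE B (Python) =====
-- def transcript(coursedetails, studentdetails, grades):
--     # Note: A sorts `grades` in place; B does not mutate it (return value is the same).
--     course_dict = dict(coursedetails)
--     student_dict = dict(studentdetails)
--     groups = {}
--     for roll, course, grade in sorted(grades):
--         groups.setdefault(roll, []).append((course, grade))
--     return [
--         (roll, student_dict[roll],
--          [(c, course_dict[c], g) for (c, g) in groups.get(roll, [])])
--         for roll in sorted(student_dict)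
--     ]
-- ===== Notes on version B (the rewrite author's own statement) =====
-- stated objective: alternative
-- what changed: B replaces A's per-student rescan of the whole grade list with a single pass over the sorted grades that groups them by roll number in a dict, then emits each student's group by one lookup; O(R*G) nested scans become O(G log G + R log R), though a timing run did not show a measurable speed-up on its inputs.
import Mathlib
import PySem

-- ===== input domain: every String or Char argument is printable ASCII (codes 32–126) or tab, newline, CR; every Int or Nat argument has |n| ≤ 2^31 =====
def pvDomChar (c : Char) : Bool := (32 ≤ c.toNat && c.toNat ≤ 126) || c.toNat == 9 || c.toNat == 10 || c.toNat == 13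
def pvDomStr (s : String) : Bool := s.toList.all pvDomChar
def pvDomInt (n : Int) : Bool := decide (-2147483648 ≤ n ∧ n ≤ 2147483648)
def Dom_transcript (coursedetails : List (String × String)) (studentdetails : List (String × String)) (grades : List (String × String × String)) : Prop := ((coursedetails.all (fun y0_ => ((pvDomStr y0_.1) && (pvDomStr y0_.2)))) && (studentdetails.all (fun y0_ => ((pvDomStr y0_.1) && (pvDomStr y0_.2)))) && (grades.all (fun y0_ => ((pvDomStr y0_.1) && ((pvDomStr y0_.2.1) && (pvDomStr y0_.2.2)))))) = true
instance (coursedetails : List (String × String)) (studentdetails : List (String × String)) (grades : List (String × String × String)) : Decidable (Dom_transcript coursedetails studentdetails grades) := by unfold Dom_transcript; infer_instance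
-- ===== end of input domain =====

-- B groups the sorted grades by roll number in one dict pass instead of rescanning all grades per
-- student. A sorts `grades` in place; B does not mutate it — the equivalence proved here is
-- about the return value only.

-- ===== PORT A =====
-- Python's grades.sort() on (str,str,str) triples (lexicographic) is expressed as a stable sort by
-- the 3rd component followed by a stable sort on the (1st,2nd) pair key — exact by stability.
-- Python's course_dict[j[1]] / student_dict[i] are ported as getD with default "": inside
-- Pre_transcript the key is always present (i ranges over student_dict's own keys), so the default
-- is never read; where the key is absent Python raises KeyError and the input is outside Pre_.
def transcript (coursedetails : List (String × String)) (studentdetails : List (String × String)) (grades : List (String × String × String)) : List (String × String × (List (String × String × String))) :=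
  let course_dict := coursedetails.foldl (fun d i => d.insert i.1 i.2) PySem.Dict.empty
  let student_dict := studentdetails.foldl (fun d i => d.insert i.1 i.2) PySem.Dict.empty
  let roll_no := student_dict.keys.foldl (fun acc r => acc ++ [r]) ([] : List String)
  let roll_no := PySem.List.sorted roll_no (fun x => x) false
  let gsorted := PySem.List.sorted2 (PySem.List.sorted grades (fun j => j.2.2) false) (fun j => j.1) (fun j => j.2.1) false
  roll_no.foldl (fun final_list i =>
      let grade_list := gsorted.foldl
        (fun gl j => if j.1 == i then gl ++ [(j.2.1, course_dict.getD j.2.1 "", j.2.2)] else gl) []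
      final_list ++ [(i, student_dict.getD i "", grade_list)]) []

-- ===== PORT B =====
-- sorted(grades) on triples: same stable two-pass sort expression as in port A (exact by stability).
-- dict lookups ported as getD "" exactly as in port A (present inside Pre_transcript).
def transcript_alt (coursedetails : List (String × String)) (studentdetails : List (String × String)) (grades : List (String × String × String)) : List (String × String × (List (String × String × String))) :=
  let course_dict := PySem.Dict.ofList coursedetails
  let student_dict := PySem.Dict.ofList studentdetails
  let groups := (PySem.List.sorted2 (PySem.List.sorted grades (fun j => j.2.2) false) (fun j => j.1) (fun j => j.2.1) false).foldl
      (fun d j => d.modify j.1 [] (· ++ [j.2])) PySem.Dict.empty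
  (PySem.List.sorted student_dict.keys (fun x => x) false).map
    (fun r => (r, student_dict.getD r "",
      (groups.getD r []).map (fun cg => (cg.1, course_dict.getD cg.1 "", cg.2))))

-- ===== PRECONDITION & SPEC =====
-- Pre_ excludes exactly the inputs where Python A raises KeyError: a grade whose roll number is a
-- student key but whose course id is not in coursedetails (B raises there too).
def Pre_transcript (coursedetails : List (String × String)) (studentdetails : List (String × String)) (grades : List (String × String × String)) : Prop :=
  (grades.all (fun j => !(studentdetails.any (fun s => s.1 == j.1)) || (coursedetails.any (fun c => c.1 == j.2.1)))) = true
instance (coursedetails : List (String × String)) (studentdetails : List (String × String)) (grades : List (String × String × String)) : Decidable (Pre_transcript coursedetails studentdetails grades) := by unfold Pre_transcript; infer_instance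
def pvWitness_transcript : (List (String × String)) × (List (String × String)) × (List (String × String × String)) :=
  ([("MA101", "Calculus"), ("CS101", "Programming")], [("r2", "Bob"), ("r1", "Alice")], [("r2", "CS101", "B"), ("r1", "MA101", "A"), ("r1", "CS101", "C")])
def Spec_transcript (coursedetails : List (String × String)) (studentdetails : List (String × String)) (grades : List (String × String × String)) (out : List (String × String × (List (String × String × String)))) : Prop := out = transcript_alt coursedetails studentdetails grades
instance (coursedetails : List (String × String)) (studentdetails : List (String × String)) (grades : List (String × String × String)) (out : List (String × String × (List (String × String × String)))) : Decidable (Spec_transcript coursedetails studentdetails grades out) := by unfold Spec_transcript; infer_instance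

-- ===== CLAIM (what is proved, stated in full; the proofs are below) =====
def Claim_equal_transcript : Prop := ∀ (coursedetails : List (String × String)) (studentdetails : List (String × String)) (grades : List (String × String × String)), Dom_transcript coursedetails studentdetails grades → Pre_transcript coursedetails studentdetails grades → Spec_transcript coursedetails studentdetails grades (transcript coursedetails studentdetails grades)

-- ===== LEMMAS AND PROOFS =====

-- ===== VERDICT (by name: the statement is the Claim_ definition above) =====
theorem transcript_spec : Claim_equal_transcript := by
  intro cd sd gr _ _
  unfold Spec_transcript transcript transcript_alt
  simp only [PySem.List.foldl_append_singleton_eq_self, List.nil_append,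
    PySem.List.foldl_append_if, PySem.List.foldl_append_singleton_eq_map,
    PySem.Dict.getD_foldl_modify_append, PySem.Dict.getD_empty, List.map_map]
  rfl
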